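-- pv_equiv track=rewrite | github.com/MaisieBae/Pixel | app/core/router.py | format_sounds_list
-- ===== SOURCE A (Python) =====
-- SOUNDS_PER_PAGE = 15
--
-- def format_sounds_list(sounds: list[str], page: int = 1, per_page: int = SOUNDS_PER_PAGE) -> str:
--     """Format sounds list with pagination info."""
--     if not sounds:
--         return "No sounds available."
--
--     total = len(sounds)
--     total_pages = (total + per_page - 1) // per_page  # Ceiling division
--
--     # Validate page number
--     if page < 1:
--         page = 1
--     if page > total_pages:
--         page = total_pages
--
--     # Calculate slice indices
--     start_idx = (page - 1) * per_page
--     end_idx = min(start_idx + per_page, total)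
--
--     # Get page of sounds
--     page_sounds = sounds[start_idx:end_idx]
--
--     # Format output
--     sounds_str = ", ".join(page_sounds)
--     footer = f" | Page {page}/{total_pages} ({total} total)"
--
--     # If message would be too long for chat, truncate the list
--     MAX_CHAT_LEN = 400
--     if len(sounds_str) + len(footer) > MAX_CHAT_LEN:
--         # Reduce list until it fits
--         while page_sounds and len(", ".join(page_sounds)) + len(footer) > MAX_CHAT_LEN:
--             page_sounds.pop()
--         sounds_str = ", ".join(page_sounds)
--         if len(page_sounds) < (end_idx - start_idx):
--             sounds_str += "..."
--
--     return f"Sounds: {sounds_str}{footer}"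
-- ===== SOURCE B (Python) =====
-- SOUNDS_PER_PAGE = 15
-- MAX_CHAT_LEN = 400
--
--
-- def format_sounds_list(sounds: list[str], page: int = 1, per_page: int = SOUNDS_PER_PAGE) -> str:
--     """Format sounds list with pagination info (single forward pass for truncation)."""
--     if not sounds:
--         return "No sounds available."
--
--     total = len(sounds)
--     total_pages = (total + per_page - 1) // per_page
--     page = min(max(page, 1), total_pages)
--
--     start_idx = (page - 1) * per_page
--     end_idx = min(start_idx + per_page, total)
--     page_sounds = sounds[start_idx:end_idx]
--
--     footer = f" | Page {page}/{total_pages} ({total} total)"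
--     budget = MAX_CHAT_LEN - len(footer)
--     joined = ", ".join(page_sounds)
--     if len(joined) <= budget:
--         return f"Sounds: {joined}{footer}"
--
--     # One pass: count how many leading entries fit inside the budget.
--     acc = 0
--     kept = 0
--     for s in page_sounds:
--         acc += len(s) + (2 if kept else 0)
--         if acc > budget:
--             break
--         kept += 1
--
--     sounds_str = ", ".join(page_sounds[:kept])
--     if kept < len(page_sounds):
--         sounds_str += "..."
--     return f"Sounds: {sounds_str}{footer}"
-- ===== Notes on version B (the rewrite author's own statement) =====
-- stated objective: faster
-- what changed: The pop-and-rejoin truncation loop (re-joining the whole page after every pop) is replaced by a single forward pass that accumulates per-entry lengths (+2 per separator) and counts how many entries fit in the 400-char budget; pagination/validation/slicing and the footer are unchanged.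
-- outside the precondition, e.g. on format_sounds_list(['a', 'b'], 1, 0): A raises ZeroDivisionError, B raises ZeroDivisionError
import Mathlib
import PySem

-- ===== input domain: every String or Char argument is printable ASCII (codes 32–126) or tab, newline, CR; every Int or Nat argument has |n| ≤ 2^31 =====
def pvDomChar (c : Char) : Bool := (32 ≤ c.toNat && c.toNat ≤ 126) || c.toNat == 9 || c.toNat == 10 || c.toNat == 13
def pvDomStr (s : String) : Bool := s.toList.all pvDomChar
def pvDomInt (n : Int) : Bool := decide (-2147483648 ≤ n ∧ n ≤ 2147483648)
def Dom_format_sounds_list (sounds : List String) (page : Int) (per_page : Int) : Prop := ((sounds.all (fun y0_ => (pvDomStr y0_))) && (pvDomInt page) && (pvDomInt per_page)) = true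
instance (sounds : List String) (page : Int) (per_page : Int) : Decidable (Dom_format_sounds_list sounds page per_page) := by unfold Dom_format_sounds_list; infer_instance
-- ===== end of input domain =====

-- B replaces A's quadratic pop-and-rejoin truncation loop by a single forward pass that counts
-- how many entries fit in the remaining budget (objective: faster truncation, one pass).

-- ===== PORT A =====
-- the `while page_sounds and len(", ".join(page_sounds)) + len(footer) > MAX_CHAT_LEN: page_sounds.pop()` loop
def popLoopA (footer : String) (l : List String) : List String :=
  if l ≠ [] ∧ 400 < PySem.Str.len (PySem.Str.join ", " l) + PySem.Str.len footer then
    popLoopA footer l.dropLast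
  else l
termination_by l.length
decreasing_by
  rename_i h
  cases l with
  | nil => exact absurd rfl h.1
  | cons a as => simp [List.length_dropLast]

def format_sounds_list (sounds : List String) (page : Int) (per_page : Int) : String :=
  if sounds = [] then "No sounds available."
  else
    let total : Int := PySem.List.len sounds
    let total_pages : Int := PySem.Int.floordiv (total + per_page - 1) per_page
    let page1 : Int := if page < 1 then 1 else page
    let page2 : Int := if page1 > total_pages then total_pages else page1
    let start_idx : Int := (page2 - 1) * per_page
    let end_idx : Int := min (start_idx + per_page) total
    let page_sounds := PySem.List.slice sounds (some start_idx) (some end_idx)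
    let sounds_str := PySem.Str.join ", " page_sounds
    let footer := " | Page " ++ PySem.Int.toStr page2 ++ "/" ++ PySem.Int.toStr total_pages ++ " (" ++ PySem.Int.toStr total ++ " total)"
    let res :=
      if 400 < PySem.Str.len sounds_str + PySem.Str.len footer then
        let ps2 := popLoopA footer page_sounds
        let s1 := PySem.Str.join ", " ps2
        if PySem.List.len ps2 < end_idx - start_idx then s1 ++ "..." else s1
      else sounds_str
    "Sounds: " ++ res ++ footer

-- ===== PORT B =====
-- the forward pass: acc, kept over page_sounds with early break
def scanB (budget : Int) (acc : Int) (kept : Int) : List String → Int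
  | [] => kept
  | s :: rest =>
      let acc' := acc + PySem.Str.len s + (if kept ≠ 0 then 2 else 0)
      if budget < acc' then kept else scanB budget acc' (kept + 1) rest

def format_sounds_list_alt (sounds : List String) (page : Int) (per_page : Int) : String :=
  if sounds = [] then "No sounds available."
  else
    let total : Int := PySem.List.len sounds
    let total_pages : Int := PySem.Int.floordiv (total + per_page - 1) per_page
    let page2 : Int := min (max page 1) total_pages
    let start_idx : Int := (page2 - 1) * per_page
    let end_idx : Int := min (start_idx + per_page) total
    let page_sounds := PySem.List.slice sounds (some start_idx) (some end_idx)
    let footer := " | Page " ++ PySem.Int.toStr page2 ++ "/" ++ PySem.Int.toStr total_pages ++ " (" ++ PySem.Int.toStr total ++ " total)"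
    let budget : Int := 400 - PySem.Str.len footer
    let joined := PySem.Str.join ", " page_sounds
    if PySem.Str.len joined ≤ budget then "Sounds: " ++ joined ++ footer
    else
      let kept := scanB budget 0 0 page_sounds
      let s1 := PySem.Str.join ", " (PySem.List.slice page_sounds none (some kept))
      let s2 := if kept < PySem.List.len page_sounds then s1 ++ "..." else s1
      "Sounds: " ++ s2 ++ footer

-- ===== PRECONDITION & SPEC =====
-- Pre_ excludes only per_page = 0 with a nonempty list, where A raises ZeroDivisionError.
def Pre_format_sounds_list (sounds : List String) (page : Int) (per_page : Int) : Prop :=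
  sounds = [] ∨ per_page ≠ 0
instance (sounds : List String) (page : Int) (per_page : Int) : Decidable (Pre_format_sounds_list sounds page per_page) := by unfold Pre_format_sounds_list; infer_instance

def pvWitness_format_sounds_list : List String × Int × Int := (["boop", "ding"], 1, 15)

def Spec_format_sounds_list (sounds : List String) (page : Int) (per_page : Int) (out : String) : Prop := out = format_sounds_list_alt sounds page per_page
instance (sounds : List String) (page : Int) (per_page : Int) (out : String) : Decidable (Spec_format_sounds_list sounds page per_page out) := by unfold Spec_format_sounds_list; infer_instance

-- ===== CLAIM (what is proved, stated in full; the proofs are below) =====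
def Claim_equal_format_sounds_list : Prop := ∀ (sounds : List String) (page : Int) (per_page : Int), Dom_format_sounds_list sounds page per_page → Pre_format_sounds_list sounds page per_page → Spec_format_sounds_list sounds page per_page (format_sounds_list sounds page per_page)

-- ===== LEMMAS AND PROOFS =====

-- length of ", ".join l, as a recursive function
def jlen2 : List String → Int
  | [] => 0
  | s :: r => 2 + (s.toList.length : Int) + jlen2 r

def jlen : List String → Int
  | [] => 0
  | s :: r => (s.toList.length : Int) + jlen2 r

theorem chars_join_len (l : List String) :
    ((PySem.Chars.join [',', ' '] (l.map String.toList)).length : Int) = jlen l := by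
  induction l with
  | nil => simp [PySem.Chars.join_nil, jlen]
  | cons s r ih =>
    cases r with
    | nil => simp [PySem.Chars.join_singleton, jlen, jlen2]
    | cons t ts =>
      rw [List.map_cons, List.map_cons, PySem.Chars.join_cons_cons, ← List.map_cons]
      simp only [List.length_append, List.length_cons, List.length_nil]
      push_cast
      rw [ih]
      simp only [jlen, jlen2]
      omega

theorem jlen_join (l : List String) : PySem.Str.len (PySem.Str.join ", " l) = jlen l := by
  rw [PySem.Str.len_eq, PySem.Str.toList_join,
    show (", ".toList = [',', ' ']) from rfl, chars_join_len]

theorem jlen2_nonneg (l : List String) : 0 ≤ jlen2 l := by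
  induction l with
  | nil => simp [jlen2]
  | cons s r ih => simp only [jlen2]; positivity

-- the largest fitting prefix, computed front-to-back
def takeFit2 (b : Int) : List String → List String
  | [] => []
  | s :: r => if b < (s.toList.length : Int) + 2 then [] else s :: takeFit2 (b - s.toList.length - 2) r

def takeFit (b : Int) : List String → List String
  | [] => []
  | s :: r => if b < (s.toList.length : Int) then [] else s :: takeFit2 (b - s.toList.length) r

theorem takeFit2_full (b : Int) (l : List String) (h : jlen2 l ≤ b) : takeFit2 b l = l := by
  induction l generalizing b with
  | nil => rfl
  | cons s r ih =>
    have hr := jlen2_nonneg r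
    simp only [jlen2] at h
    rw [takeFit2, if_neg (by omega), ih _ (by omega)]

theorem takeFit_full (b : Int) (l : List String) (h : jlen l ≤ b) : takeFit b l = l := by
  cases l with
  | nil => rfl
  | cons s r =>
    have hr := jlen2_nonneg r
    simp only [jlen] at h
    rw [takeFit, if_neg (by omega), takeFit2_full _ _ (by omega)]

theorem takeFit2_drop (b : Int) (l : List String) (h : b < jlen2 l) :
    takeFit2 b l = takeFit2 b l.dropLast := by
  induction l generalizing b with
  | nil => rfl
  | cons s r ih =>
    cases r with
    | nil =>
      simp only [jlen2] at h
      rw [show ([s] : List String).dropLast = [] from rfl, takeFit2, takeFit2, if_pos (by omega)]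
    | cons t ts =>
      simp only [jlen2] at h
      rw [show ((s :: t :: ts).dropLast = s :: (t :: ts).dropLast) from rfl]
      rw [takeFit2]
      conv_rhs => rw [takeFit2]
      split_ifs
      · rfl
      · rw [ih _ (by simp only [jlen2]; omega)]

theorem takeFit_drop (b : Int) (l : List String) (h : b < jlen l) :
    takeFit b l = takeFit b l.dropLast := by
  cases l with
  | nil => rfl
  | cons s r =>
    cases r with
    | nil =>
      simp only [jlen, jlen2] at h
      rw [show ([s] : List String).dropLast = [] from rfl, takeFit, takeFit, if_pos (by omega)]
    | cons t ts =>
      simp only [jlen] at h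
      rw [show ((s :: t :: ts).dropLast = s :: (t :: ts).dropLast) from rfl]
      rw [takeFit]
      conv_rhs => rw [takeFit]
      split_ifs
      · rfl
      · rw [takeFit2_drop _ _ (by omega)]

theorem popLoopA_eq_takeFit (footer : String) (l : List String) :
    popLoopA footer l = takeFit (400 - PySem.Str.len footer) l := by
  generalize hn : l.length = n
  induction n generalizing l with
  | zero =>
    have : l = [] := List.length_eq_zero_iff.mp hn
    subst this
    rw [popLoopA]
    simp
    rfl
  | succ n ih =>
    rw [popLoopA, jlen_join]
    split_ifs with hgate
    · rw [ih l.dropLast (by cases l with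
        | nil => exact absurd rfl hgate.1
        | cons a as => simp [List.length_dropLast] at hn ⊢; omega)]
      exact (takeFit_drop _ _ (by omega)).symm
    · rcases not_and_or.mp hgate with h1 | h2
      · rw [not_not.mp h1]
        rfl
      · exact (takeFit_full _ _ (by omega)).symm

theorem scanB_pos (r : List String) (b acc kept : Int) (hk : 0 < kept) :
    scanB b acc kept r = kept + ((takeFit2 (b - acc) r).length : Int) := by
  induction r generalizing acc kept with
  | nil => rw [scanB, takeFit2]; simp
  | cons s t ih =>
    rw [scanB, takeFit2]
    simp only [if_pos (show kept ≠ 0 by omega), PySem.Str.len_eq]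
    split_ifs with h1 h2 h2
    · simp
    · omega
    · omega
    · rw [ih _ _ (by omega), show b - acc - (s.toList.length : Int) - 2 = b - (acc + (s.toList.length : Int) + 2) by ring]
      simp only [List.length_cons]
      push_cast
      ring
  
theorem scanB_zero (l : List String) (b : Int) :
    scanB b 0 0 l = ((takeFit b l).length : Int) := by
  cases l with
  | nil => rw [scanB, takeFit]; rfl
  | cons s t =>
    rw [scanB, takeFit]
    simp only [if_neg (show ¬((0:Int) ≠ 0) by omega), PySem.Str.len_eq]
    split_ifs with h1 h2 h2
    · simp
    · omega
    · omega
    · rw [scanB_pos _ _ _ _ (by omega), show b - (0 + (s.toList.length : Int) + 0) = b - (s.toList.length : Int) by ring]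
      simp only [List.length_cons]
      push_cast
      ring

theorem takeFit2_prefix (b : Int) (l : List String) : takeFit2 b l <+: l := by
  induction l generalizing b with
  | nil => exact List.nil_prefix
  | cons s r ih =>
    rw [takeFit2]
    split_ifs
    · exact List.nil_prefix
    · exact List.cons_prefix_cons.mpr ⟨rfl, ih _⟩

theorem takeFit_prefix (b : Int) (l : List String) : takeFit b l <+: l := by
  cases l with
  | nil => exact List.nil_prefix
  | cons s r =>
    rw [takeFit]
    split_ifs
    · exact List.nil_prefix
    · exact List.cons_prefix_cons.mpr ⟨rfl, takeFit2_prefix _ _⟩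

theorem take_takeFit (b : Int) (l : List String) :
    l.take (takeFit b l).length = takeFit b l :=
  (List.prefix_iff_eq_take.mp (takeFit_prefix b l)).symm

-- the two truncation branches agree, given the page/slice relationship
theorem core_branch (ps : List String) (footer : String) (d : Int)
    (hd : ((ps.length : Int) = d) ∨ (ps = [] ∧ d < 0)) :
    (if 400 < PySem.Str.len (PySem.Str.join ", " ps) + PySem.Str.len footer then
       if PySem.List.len (popLoopA footer ps) < d then
         PySem.Str.join ", " (popLoopA footer ps) ++ "..."
       else PySem.Str.join ", " (popLoopA footer ps)
     else PySem.Str.join ", " ps)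
    = (if PySem.Str.len (PySem.Str.join ", " ps) ≤ 400 - PySem.Str.len footer then
         PySem.Str.join ", " ps
       else
         if scanB (400 - PySem.Str.len footer) 0 0 ps < PySem.List.len ps then
           PySem.Str.join ", "
             (PySem.List.slice ps none (some (scanB (400 - PySem.Str.len footer) 0 0 ps))) ++ "..."
         else
           PySem.Str.join ", "
             (PySem.List.slice ps none (some (scanB (400 - PySem.Str.len footer) 0 0 ps)))) := by
  by_cases hfit : PySem.Str.len (PySem.Str.join ", " ps) ≤ 400 - PySem.Str.len footer
  · rw [if_neg (by omega), if_pos hfit]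
  · rw [if_pos (by omega), if_neg hfit]
    simp only [popLoopA_eq_takeFit, scanB_zero]
    rw [PySem.List.slice_to ps (Int.natCast_nonneg _), Int.toNat_natCast, take_takeFit]
    simp only [PySem.List.len_eq]
    rcases hd with hd | ⟨hnil, hdneg⟩
    · split_ifs <;> first | rfl | omega
    · subst hnil
      rw [show takeFit (400 - PySem.Str.len footer) ([] : List String) = [] from rfl]
      simp only [List.length_nil, Nat.cast_zero]
      rw [if_neg (by omega), if_neg (by omega)]

-- clamping the page: A's two ifs equal B's min/max
theorem clamp_eq (p t : Int) :
    (if (if p < 1 then 1 else p) > t then t else (if p < 1 then 1 else p)) = min (max p 1) t := by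
  split_ifs <;> omega

theorem mod_bounds_neg (a b : Int) (hb : b < 0) :
    b < PySem.Int.mod a b ∧ PySem.Int.mod a b ≤ 0 := by
  have h1 : PySem.Int.mod (-a) (-b) = - PySem.Int.mod a b := PySem.Int.mod_neg_neg a b
  have h2 := PySem.Int.mod_nonneg (-a) (b := -b) (by omega)
  have h3 := PySem.Int.mod_lt (-a) (b := -b) (by omega)
  omega

-- ===== VERDICT (by name: the statement is the Claim_ definition above) =====
theorem ite_concat (c : Prop) [Decidable c] (x y pre post : String) :
    (if c then pre ++ x ++ post else pre ++ y ++ post) = pre ++ (if c then x else y) ++ post := by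
  split_ifs <;> rfl

theorem format_sounds_list_spec : Claim_equal_format_sounds_list := by
  intro sounds page pp _hdom hpre
  unfold Spec_format_sounds_list format_sounds_list format_sounds_list_alt
  by_cases hs : sounds = []
  · simp [hs]
  · have hpp : pp ≠ 0 := by
      rcases hpre with h | h
      · exact absurd h hs
      · exact h
    simp only [if_neg hs, clamp_eq]
    set n : Int := PySem.List.len sounds with hn
    set tp : Int := PySem.Int.floordiv (n + pp - 1) pp with htp
    set pg : Int := min (max page 1) tp with hpg
    set st : Int := (pg - 1) * pp with hst
    set en : Int := min (st + pp) n with hen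
    set ps : List String := PySem.List.slice sounds (some st) (some en) with hps
    rw [ite_concat]
    have hlen : (sounds.length : Int) = n := by rw [hn, PySem.List.len_eq]
    have hn1 : (1 : Int) ≤ n := by
      have : sounds.length ≠ 0 := fun h => hs (List.length_eq_zero_iff.mp h)
      omega
    have hmod := PySem.Int.floordiv_mul_add_mod (n + pp - 1) pp
    rw [← htp] at hmod
    set m : Int := PySem.Int.mod (n + pp - 1) pp with hm
    have hpslen := PySem.List.length_slice sounds st en
    rw [← hps] at hpslen
    rw [PySem.List.clampIdx, PySem.List.clampIdx] at hpslen
    have hd : ((ps.length : Int) = en - st) ∨ (ps = [] ∧ en - st < 0) := by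
      rcases lt_or_gt_of_ne hpp with hneg | hpos
      · -- per_page < 0 : the page slice is empty and end_idx < start_idx
        have hmb := mod_bounds_neg (n + pp - 1) pp hneg
        rw [← hm] at hmb
        right
        refine ⟨List.length_eq_zero_iff.mp ?_, by omega⟩
        by_cases h1 : n = 1
        · -- total = 1 : total_pages = 1, start = 0, end = per_page < 0
          have ht1 : tp = 1 := by
            have hge : 1 ≤ tp := by nlinarith
            have hle : tp ≤ 1 := by nlinarith
            omega
          have hpg1 : pg = 1 := by omega
          have hst0 : st = 0 := by rw [hst, hpg1]; ring
          rw [hst0] at hen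
          split_ifs at hpslen <;> omega
        · -- total ≥ 2 : total_pages ≤ 0, start ≥ 0, end = total_pages*per_page ∈ [0, start)
          have hn2 : 2 ≤ n := by omega
          have htp0 : tp ≤ 0 := by
            by_contra hcon
            have hcon : 1 ≤ tp := by omega
            nlinarith [mul_nonneg (show (0:Int) ≤ tp - 1 by omega) (show (0:Int) ≤ -pp by omega)]
          have hpgtp : pg = tp := by omega
          have hX0 : 0 ≤ tp * pp := by nlinarith [mul_nonneg (show (0:Int) ≤ -tp by omega) (show (0:Int) ≤ -pp by omega)]
          have hstpp : st + pp = tp * pp := by rw [hst, hpgtp]; ring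
          have hst0 : 0 ≤ st := by omega
          have henX : en = tp * pp := by omega
          split_ifs at hpslen <;> omega
      · -- per_page ≥ 1 : the slice has exactly end_idx - start_idx elements
        have hm0 := PySem.Int.mod_nonneg (n + pp - 1) hpos
        have hmlt := PySem.Int.mod_lt (n + pp - 1) hpos
        rw [← hm] at hm0 hmlt
        have htp1 : 1 ≤ tp := by nlinarith
        have hpg1 : 1 ≤ pg := by omega
        have hpgtp : pg ≤ tp := by omega
        have hstub : st ≤ (tp - 1) * pp :=
          mul_le_mul_of_nonneg_right (by omega) (by omega)
        have hexp : (tp - 1) * pp = tp * pp - pp := by ring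
        have hst0 : 0 ≤ st := mul_nonneg (by omega) (by omega)
        have hstn : st ≤ n - 1 := by omega
        left
        split_ifs at hpslen <;> omega
    rw [core_branch ps _ (en - st) hd]
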